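-- pv_equiv track=rewrite | github.com/Makusaaa/skripsi-telescraper-api | app/lib/fileParser.py | split_string_with_exceptions
-- ===== SOURCE A (Python) =====
-- from itertools import combinations
--
-- def split_string_with_exceptions(input_string, char, exceptions):
--     positions = [i for i, c in enumerate(input_string) if c == char]
--     combinations_to_exclude = combinations(positions, exceptions)
--
--     results = []
--     for exclude in combinations_to_exclude:
--         split_result = []
--         last_index = 0
--         for i, c in enumerate(input_string):
--             if i in positions and i not in exclude:
--                 split_result.append(input_string[last_index:i])
--                 last_index = i + 1
--         split_result.append(input_string[last_index:])
--         results.append(split_result)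
--     return results
-- ===== SOURCE B (Python) =====
-- from itertools import combinations
--
--
-- def split_string_with_exceptions(input_string, char, exceptions):
--     # Split once into base segments at every occurrence of char, then for each
--     # combination of excluded split indices glue neighbouring segments back.
--     positions = [i for i, c in enumerate(input_string) if c == char]
--     n = len(positions)
--     segs = []
--     last = 0
--     for p in positions:
--         segs.append(input_string[last:p])
--         last = p + 1
--     segs.append(input_string[last:])
--
--     results = []
--     for exclude in combinations(range(n), exceptions):
--         ex = set(exclude)
--         acc = []
--         cur = segs[0]
--         for j in range(n):
--             if j in ex:
--                 cur = cur + char + segs[j + 1]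
--             else:
--                 acc.append(cur)
--                 cur = segs[j + 1]
--         acc.append(cur)
--         results.append(acc)
--     return results
-- ===== Notes on version B (the rewrite author's own statement) =====
-- stated objective: alternative
-- what changed: B precomputes the n+1 base segments by splitting at all occurrence positions once, then reconstructs each result by gluing segments back across the excluded split indices, instead of A's full rescan of the string with membership tests for every combination.
import Mathlib
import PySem

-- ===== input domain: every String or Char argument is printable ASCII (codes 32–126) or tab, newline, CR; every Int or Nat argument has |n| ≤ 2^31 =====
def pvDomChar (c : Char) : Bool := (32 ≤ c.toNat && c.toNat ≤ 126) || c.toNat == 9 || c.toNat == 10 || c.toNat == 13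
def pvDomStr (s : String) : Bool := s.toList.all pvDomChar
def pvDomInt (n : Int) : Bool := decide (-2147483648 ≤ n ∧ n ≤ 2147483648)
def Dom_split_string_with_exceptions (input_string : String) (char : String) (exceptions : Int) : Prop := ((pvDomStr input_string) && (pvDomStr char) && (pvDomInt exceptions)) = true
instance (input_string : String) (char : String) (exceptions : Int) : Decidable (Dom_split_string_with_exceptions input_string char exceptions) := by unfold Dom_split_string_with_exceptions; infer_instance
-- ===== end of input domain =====

-- B re-splits by precomputing the n+1 base segments once and gluing them back per
-- combination of excluded split indices, instead of A's rescan of the whole string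
-- per combination (objective: alternative decomposition / less per-combination work).

-- ===== PORT A =====
-- A, step for step: positions of matching chars; for each combination of positions to
-- exclude, rescan the string, cutting at active positions.  A Python string slice
-- s[a:b] is ported as String.ofList (PySem.List.slice s.toList …) — exact.
-- combinations(…, exceptions) is PySem.List.combinations with r = exceptions.toNat
-- (Python raises ValueError for exceptions < 0 — excluded by Pre_ below).
def split_string_with_exceptions (input_string : String) (char : String) (exceptions : Int) : List (List String) :=
  let cs := input_string.toList
  let positions : List Int := (PySem.List.enumerate cs).filterMap
      (fun ic => if [ic.2] = char.toList then some ic.1 else none)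
  (PySem.List.combinations positions exceptions.toNat).map (fun (exclude : List Int) =>
    let st := (PySem.List.enumerate cs).foldl
      (fun (acc : List String × Int) ic =>
        if ic.1 ∈ positions ∧ ic.1 ∉ exclude then
          (acc.1 ++ [String.ofList (PySem.List.slice cs (some acc.2) (some ic.1))], ic.1 + 1)
        else acc) ([], 0)
    st.1 ++ [String.ofList (PySem.List.slice cs (some st.2) none)])

-- ===== PORT B =====
-- B, step for step: build segs (the n+1 base segments) once by one pass over the
-- positions; per combination of excluded indices, glue segments (Python string
-- concatenation is ported on List Char, wrapped with String.ofList when a piece is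
-- finished — exact).
def split_string_with_exceptions_alt (input_string : String) (char : String) (exceptions : Int) : List (List String) :=
  let cs := input_string.toList
  let positions : List Int := (PySem.List.enumerate cs).filterMap
      (fun ic => if [ic.2] = char.toList then some ic.1 else none)
  let n := positions.length
  let sb := positions.foldl
      (fun (acc : List (List Char) × Int) p =>
        (acc.1 ++ [PySem.List.slice cs (some acc.2) (some p)], p + 1)) ([], 0)
  let segs := sb.1 ++ [PySem.List.slice cs (some sb.2) none]
  (PySem.List.combinations (PySem.List.pyRange 0 (n : Int)) exceptions.toNat).map (fun (ex : List Int) =>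
    let st := (PySem.List.pyRange 0 (n : Int)).foldl
      (fun (acc : List String × List Char) j =>
        if j ∈ ex then (acc.1, acc.2 ++ char.toList ++ PySem.List.pyGetD segs (j + 1) [])
        else (acc.1 ++ [String.ofList acc.2], PySem.List.pyGetD segs (j + 1) []))
      ([], PySem.List.pyGetD segs 0 [])
    st.1 ++ [String.ofList st.2])

-- ===== PRECONDITION & SPEC =====
-- Pre_ excludes only exceptions < 0, where Python's combinations raises ValueError
-- (in A and in B alike).
def Pre_split_string_with_exceptions (input_string : String) (char : String) (exceptions : Int) : Prop := 0 ≤ exceptions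
instance (input_string : String) (char : String) (exceptions : Int) : Decidable (Pre_split_string_with_exceptions input_string char exceptions) := by unfold Pre_split_string_with_exceptions; infer_instance
def pvWitness_split_string_with_exceptions : String × String × Int := ("a,b,c", ",", 1)

def Spec_split_string_with_exceptions (input_string : String) (char : String) (exceptions : Int) (out : List (List String)) : Prop := out = split_string_with_exceptions_alt input_string char exceptions
instance (input_string : String) (char : String) (exceptions : Int) (out : List (List String)) : Decidable (Spec_split_string_with_exceptions input_string char exceptions out) := by unfold Spec_split_string_with_exceptions; infer_instance

-- ===== CLAIM (what is proved, stated in full; the proofs are below) =====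
def Claim_equal_split_string_with_exceptions : Prop := ∀ (input_string : String) (char : String) (exceptions : Int), Dom_split_string_with_exceptions input_string char exceptions → Pre_split_string_with_exceptions input_string char exceptions → Spec_split_string_with_exceptions input_string char exceptions (split_string_with_exceptions input_string char exceptions)

-- ===== LEMMAS AND PROOFS =====

-- the "cut cs at the positions in l, starting a piece at t" shapes shared by the proofs
def pvChop (cs : List Char) (t : Int) : List Int → List (List Char) × Int
  | [] => ([], t)
  | p :: ps =>
      let r := pvChop cs (p + 1) ps
      (PySem.List.slice cs (some t) (some p) :: r.1, r.2)

def pvPieces (cs : List Char) (t : Int) : List Int → List (List Char)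
  | [] => [PySem.List.slice cs (some t) none]
  | p :: ps => PySem.List.slice cs (some t) (some p) :: pvPieces cs (p + 1) ps

def pvChunk (cs : List Char) (t : Int) : List Int → List Char
  | [] => PySem.List.slice cs (some t) none
  | p :: _ => PySem.List.slice cs (some t) (some p)

theorem pvPieces_eq_chop (cs : List Char) (l : List Int) (t : Int) :
    pvPieces cs t l = (pvChop cs t l).1 ++ [PySem.List.slice cs (some (pvChop cs t l).2) none] := by
  induction l generalizing t with
  | nil => simp [pvPieces, pvChop]
  | cons p ps ih => simp [pvPieces, pvChop, ih]

-- A's inner rescan loop, characterised: it cuts at exactly the indices of l passing q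
theorem pvFoldA (cs : List Char) (q : Int → Prop) [DecidablePred q] :
    ∀ (l : List Int) (res : List String) (t : Int),
      l.foldl (fun (acc : List String × Int) j =>
          if q j then
            (acc.1 ++ [String.ofList (PySem.List.slice cs (some acc.2) (some j))], j + 1)
          else acc) (res, t)
      = (res ++ ((pvChop cs t (l.filter (fun j => decide (q j)))).1).map String.ofList,
         (pvChop cs t (l.filter (fun j => decide (q j)))).2) := by
  intro l
  induction l with
  | nil => intro res t; simp [pvChop]
  | cons j l ih =>
      intro res t
      by_cases hq : q j
      · simp [List.foldl_cons, hq, ih, pvChop]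
      · simp [List.foldl_cons, hq, ih]

-- B's segment-building loop, characterised
theorem pvFoldSeg (cs : List Char) :
    ∀ (l : List Int) (res : List (List Char)) (t : Int),
      l.foldl (fun (acc : List (List Char) × Int) p =>
          (acc.1 ++ [PySem.List.slice cs (some acc.2) (some p)], p + 1)) (res, t)
      = (res ++ (pvChop cs t l).1, (pvChop cs t l).2) := by
  intro l
  induction l with
  | nil => intro res t; simp [pvChop]
  | cons p ps ih => intro res t; simp [List.foldl_cons, ih, pvChop]

theorem pvPieces_getD_zero (cs : List Char) (l : List Int) (t : Int) :
    (pvPieces cs t l).getD 0 [] = pvChunk cs t l := by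
  cases l <;> rfl

theorem pvPieces_getD (cs : List Char) :
    ∀ (l : List Int) (t : Int) (k : Nat), k < l.length →
      (pvPieces cs t l).getD (k + 1) [] = pvChunk cs (l.getD k 0 + 1) (l.drop (k + 1)) := by
  intro l
  induction l with
  | nil => intro t k h; simp at h
  | cons p ps ih =>
      intro t k h
      cases k with
      | zero => simpa [pvPieces] using pvPieces_getD_zero cs ps (p + 1)
      | succ k => simpa [pvPieces] using ih (p + 1) k (by simpa using h)

theorem pvMergeNone (cs : List Char) (a b : Nat) (hab : a ≤ b) (hb : b < cs.length) :
    (cs.drop a).take (b - a) ++ cs[b] :: cs.drop (b + 1) = cs.drop a := by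
  conv_rhs => rw [← List.take_append_drop (b - a) (cs.drop a)]
  congr 1
  rw [List.drop_drop]
  have h : a + (b - a) = b := by omega
  rw [h, List.drop_eq_getElem_cons hb]

theorem pvMergeSome (cs : List Char) (a b q : Nat) (hab : a ≤ b) (hb : b < cs.length) (hq : b < q) :
    (cs.drop a).take (b - a) ++ cs[b] :: (cs.drop (b + 1)).take (q - (b + 1))
      = (cs.drop a).take (q - a) := by
  have h1 : q - a = (b - a) + (1 + (q - (b + 1))) := by omega
  rw [h1, List.take_add]
  congr 1
  rw [List.drop_drop]
  have h : a + (b - a) = b := by omega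
  rw [h, List.drop_eq_getElem_cons hb]
  have h2 : 1 + (q - (b + 1)) = (q - (b + 1)) + 1 := by omega
  rw [h2, List.take_succ_cons]

-- gluing a split piece back across an excluded position
theorem pvMerge (cs : List Char) (t p : Int) (rest : List Int)
    (ht : 0 ≤ t) (htp : t ≤ p) (hp : p.toNat < cs.length)
    (hrest : ∀ r ∈ rest, p < r) :
    PySem.List.slice cs (some t) (some p) ++ cs[p.toNat] :: pvChunk cs (p + 1) rest
      = pvChunk cs t rest := by
  have hp0 : 0 ≤ p := le_trans ht htp
  have hp1 : (p + 1).toNat = p.toNat + 1 := by omega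
  have hab : t.toNat ≤ p.toNat := by omega
  cases rest with
  | nil =>
      simp only [pvChunk]
      rw [PySem.List.slice_toNat cs ht hp0, PySem.List.slice_from cs (by omega),
        PySem.List.slice_from cs ht, hp1]
      exact pvMergeNone cs t.toNat p.toNat hab hp
  | cons r rs =>
      have hr : p < r := hrest r (List.mem_cons_self ..)
      have hr0 : 0 ≤ r := by omega
      simp only [pvChunk]
      rw [PySem.List.slice_toNat cs ht hp0, PySem.List.slice_toNat cs (by omega) hr0,
        PySem.List.slice_toNat cs ht hr0, hp1]
      exact pvMergeSome cs t.toNat p.toNat r.toNat hab hp (by omega)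

-- the main loop lemma for B's gluing pass
theorem pvGlue (cs : List Char) (ch : List Char) (P : List Int) (ex : List Int)
    (hpw : P.Pairwise (· < ·))
    (hmem : ∀ p ∈ P, 0 ≤ p ∧ p.toNat < cs.length ∧ ch = [cs.getD p.toNat 'x']) :
    ∀ (k a : Nat), a + k = P.length → ∀ (acc : List String) (t : Int),
      0 ≤ t → (∀ p ∈ P.drop a, t ≤ p) →
      ((PySem.List.pyRange (a : Int) (P.length : Int)).foldl
          (fun (acc : List String × List Char) j =>
            if j ∈ ex then (acc.1, acc.2 ++ ch ++ PySem.List.pyGetD (pvPieces cs 0 P) (j + 1) [])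
            else (acc.1 ++ [String.ofList acc.2], PySem.List.pyGetD (pvPieces cs 0 P) (j + 1) []))
          (acc, pvChunk cs t (P.drop a))).1
        ++ [String.ofList ((PySem.List.pyRange (a : Int) (P.length : Int)).foldl
          (fun (acc : List String × List Char) j =>
            if j ∈ ex then (acc.1, acc.2 ++ ch ++ PySem.List.pyGetD (pvPieces cs 0 P) (j + 1) [])
            else (acc.1 ++ [String.ofList acc.2], PySem.List.pyGetD (pvPieces cs 0 P) (j + 1) []))
          (acc, pvChunk cs t (P.drop a))).2]
      = acc ++ (pvPieces cs t
          (((PySem.List.pyRange (a : Int) (P.length : Int)).filter (fun j => decide (j ∉ ex))).map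
            (fun j => PySem.List.pyGetD P j 0))).map String.ofList := by
  intro k
  induction k with
  | zero =>
      intro a ha acc t ht htle
      have ha' : a = P.length := by omega
      subst ha'
      rw [PySem.List.pyRange_one_eq_nil (le_refl _)]
      simp [List.drop_length, pvChunk, pvPieces]
  | succ k ih =>
      intro a ha acc t ht htle
      have hak : a < P.length := by omega
      have hcons : P.drop a = P[a] :: P.drop (a + 1) := List.drop_eq_getElem_cons hak
      obtain ⟨hp0, hplen, hch⟩ := hmem P[a] (List.getElem_mem hak)
      have htp : t ≤ P[a] := htle P[a] (by rw [hcons]; exact List.mem_cons_self ..)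
      have hlt : ∀ r ∈ P.drop (a + 1), P[a] < r := by
        have hpwa : (P.drop a).Pairwise (· < ·) := hpw.sublist (List.drop_sublist a P)
        rw [hcons] at hpwa
        exact (List.pairwise_cons.mp hpwa).1
      have hcast : ((a : Int) + 1) = ((a + 1 : Nat) : Int) := by push_cast; ring
      have hrange : PySem.List.pyRange (a : Int) (P.length : Int)
          = (a : Int) :: PySem.List.pyRange ((a + 1 : Nat) : Int) (P.length : Int) := by
        rw [PySem.List.pyRange_one_cons (by exact_mod_cast hak), hcast]
      have hseg : PySem.List.pyGetD (pvPieces cs 0 P) ((a : Int) + 1) []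
          = pvChunk cs (P[a] + 1) (P.drop (a + 1)) := by
        rw [hcast, PySem.List.pyGetD_natCast, pvPieces_getD cs P 0 a hak, List.getD_eq_getElem P 0 hak]
      have hchunk : pvChunk cs t (P.drop a) = PySem.List.slice cs (some t) (some P[a]) := by
        rw [hcons]; rfl
      have hgetD : PySem.List.pyGetD P (a : Int) 0 = P[a] := by
        rw [PySem.List.pyGetD_natCast, List.getD_eq_getElem P 0 hak]
      rw [hrange, hchunk, List.foldl_cons]
      by_cases hex : (a : Int) ∈ ex
      · rw [if_pos hex]; dsimp only; rw [hseg]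
        have hmerge : PySem.List.slice cs (some t) (some P[a]) ++ ch ++ pvChunk cs (P[a] + 1) (P.drop (a + 1))
            = pvChunk cs t (P.drop (a + 1)) := by
          rw [hch, List.getD_eq_getElem cs 'x' hplen, List.append_assoc, List.singleton_append]
          exact pvMerge cs t P[a] (P.drop (a + 1)) ht htp hplen hlt
        rw [List.filter_cons, if_neg (by simp [hex]), hmerge]
        exact ih (a + 1) (by omega) acc t ht (fun p hp => le_trans htp (le_of_lt (hlt p hp)))
      · rw [if_neg hex]; dsimp only; rw [hseg]
        rw [List.filter_cons, if_pos (by simp [hex]), List.map_cons, hgetD]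
        have hih := ih (a + 1) (by omega)
          (acc ++ [String.ofList (PySem.List.slice cs (some t) (some P[a]))]) (P[a] + 1)
          (by omega) (fun p hp => by have := hlt p hp; omega)
        rw [hih]
        simp [pvPieces]


theorem pvFilterMapIf {α : Type} (q : α → Prop) [DecidablePred q] (l : List α) :
    l.filterMap (fun j => if q j then some j else none) = l.filter (fun j => decide (q j)) := by
  induction l with
  | nil => rfl
  | cons x l ih => by_cases hx : q x <;> simp [hx, ih]

-- A's and B's shared positions computation, as a filter of the index range
theorem pvPositions (cs : List Char) (chL : List Char) :
    (PySem.List.enumerate cs).filterMap (fun ic => if [ic.2] = chL then some ic.1 else none)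
      = (PySem.List.pyRange 0 (PySem.List.len cs)).filter
          (fun j => decide ([PySem.List.pyGetD cs j 'x'] = chL)) := by
  rw [PySem.List.enumerate_eq_map_pyRange cs 'x', List.filterMap_map]
  exact pvFilterMapIf (fun j => [PySem.List.pyGetD cs j 'x'] = chL) _

theorem pvChopAssemble (cs : List Char) (L : List Int) (t : Int) :
    ((pvChop cs t L).1).map String.ofList
        ++ [String.ofList (PySem.List.slice cs (some (pvChop cs t L).2) none)]
      = (pvPieces cs t L).map String.ofList := by
  rw [pvPieces_eq_chop, List.map_append]
  rfl

-- ===== VERDICT (by name: the statement is the Claim_ definition above) =====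
set_option maxHeartbeats 2000000 in
theorem split_string_with_exceptions_spec : Claim_equal_split_string_with_exceptions := by
  intro s char r _hdom _hpre
  show split_string_with_exceptions s char r = split_string_with_exceptions_alt s char r
  simp only [split_string_with_exceptions, split_string_with_exceptions_alt]
  set cs := s.toList with hcs
  set P := (PySem.List.enumerate cs).filterMap
      (fun ic => if [ic.2] = char.toList then some ic.1 else none) with hP
  have hpos : P = (PySem.List.pyRange 0 (PySem.List.len cs)).filter
      (fun j => decide ([PySem.List.pyGetD cs j 'x'] = char.toList)) := by
    rw [hP]; exact pvPositions cs char.toList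
  have hPpw : P.Pairwise (· < ·) := by
    rw [hpos]; exact List.Pairwise.filter _ (PySem.List.pairwise_lt_pyRange_one 0 _)
  have hPmem : ∀ p ∈ P, 0 ≤ p ∧ p.toNat < cs.length ∧ char.toList = [cs.getD p.toNat 'x'] := by
    intro p hp
    rw [hpos, List.mem_filter] at hp
    obtain ⟨h1, h2⟩ := hp
    rw [PySem.List.mem_pyRange_one] at h1
    have hlen : p < (cs.length : Int) := by simpa using h1.2
    have h3 := of_decide_eq_true h2
    rw [PySem.List.pyGetD_eq_getElem cs 'x' h1.1 hlen] at h3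
    refine ⟨h1.1, by omega, ?_⟩
    rw [List.getD_eq_getElem cs 'x' (by omega)]
    exact h3.symm
  have hPmap : (PySem.List.pyRange 0 (P.length : Int)).map (fun j => PySem.List.pyGetD P j 0) = P :=
    PySem.List.map_pyGetD_pyRange_zero' P 0
  have hinj : ∀ j j' : Int, j ∈ PySem.List.pyRange 0 (P.length : Int) →
      j' ∈ PySem.List.pyRange 0 (P.length : Int) →
      PySem.List.pyGetD P j 0 = PySem.List.pyGetD P j' 0 → j = j' := by
    intro j j' hj hj' he
    rw [PySem.List.mem_pyRange_one] at hj hj'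
    rw [PySem.List.pyGetD_eq_getElem P 0 hj.1 hj.2, PySem.List.pyGetD_eq_getElem P 0 hj'.1 hj'.2] at he
    by_contra hne
    rcases lt_trichotomy j j' with h | h | h
    · have := (List.pairwise_iff_getElem.mp hPpw) j.toNat j'.toNat (by omega) (by omega) (by omega)
      omega
    · exact hne h
    · have := (List.pairwise_iff_getElem.mp hPpw) j'.toNat j.toNat (by omega) (by omega) (by omega)
      omega
  have hfilt : ∀ exclude : List Int,
      (PySem.List.pyRange 0 (PySem.List.len cs)).filter (fun j => decide (j ∈ P ∧ j ∉ exclude))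
        = P.filter (fun j => decide (j ∉ exclude)) := by
    intro exclude
    conv_rhs => rw [hpos]
    rw [List.filter_filter]
    apply List.filter_congr
    intro j hj
    have hmem_iff : j ∈ P ↔ ([PySem.List.pyGetD cs j 'x'] = char.toList) := by
      rw [hpos, List.mem_filter]
      constructor
      · rintro ⟨_, h⟩; exact of_decide_eq_true h
      · intro h; exact ⟨hj, decide_eq_true h⟩
    by_cases h1 : [PySem.List.pyGetD cs j 'x'] = char.toList <;>
      by_cases h2 : j ∈ exclude <;> simp [h1, h2, hmem_iff]
  have hact : ∀ ex : List Int, ex.Sublist (PySem.List.pyRange 0 (P.length : Int)) →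
      P.filter (fun x => decide (x ∉ ex.map (fun j => PySem.List.pyGetD P j 0)))
        = ((PySem.List.pyRange 0 (P.length : Int)).filter (fun j => decide (j ∉ ex))).map
            (fun j => PySem.List.pyGetD P j 0) := by
    intro ex hsub
    calc P.filter (fun x => decide (x ∉ ex.map (fun j => PySem.List.pyGetD P j 0)))
        = ((PySem.List.pyRange 0 (P.length : Int)).map (fun j => PySem.List.pyGetD P j 0)).filter
            (fun x => decide (x ∉ ex.map (fun j => PySem.List.pyGetD P j 0))) := by rw [hPmap]
      _ = ((PySem.List.pyRange 0 (P.length : Int)).filter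
            ((fun x => decide (x ∉ ex.map (fun j => PySem.List.pyGetD P j 0))) ∘
              (fun j => PySem.List.pyGetD P j 0))).map (fun j => PySem.List.pyGetD P j 0) :=
          List.filter_map
      _ = ((PySem.List.pyRange 0 (P.length : Int)).filter (fun j => decide (j ∉ ex))).map
            (fun j => PySem.List.pyGetD P j 0) := by
          congr 1
          apply List.filter_congr
          intro j hj
          simp only [Function.comp]
          rw [decide_eq_decide, not_iff_not]
          constructor
          · intro h
            rcases List.mem_map.mp h with ⟨j', hj', hgj⟩
            exact (hinj j' j (hsub.subset hj') hj hgj) ▸ hj'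
          · exact fun h => List.mem_map_of_mem h
  -- B's segment list is pvPieces, its initial piece is pvChunk
  rw [pvFoldSeg cs P [] 0]
  dsimp only
  rw [List.nil_append, ← pvPieces_eq_chop cs P 0, PySem.List.pyGetD_zero, pvPieces_getD_zero]
  -- A's combinations over positions are B's combinations over indices, mapped
  have hcomb : PySem.List.combinations P r.toNat
      = (PySem.List.combinations (PySem.List.pyRange 0 (P.length : Int)) r.toNat).map
          (List.map (fun j => PySem.List.pyGetD P j 0)) := by
    conv_lhs => rw [← hPmap]
    exact PySem.List.combinations_map _ _ _
  rw [hcomb, List.map_map]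
  apply List.map_congr_left
  intro ex hex
  have hsub := PySem.List.sublist_of_mem_combinations hex
  dsimp only [Function.comp]
  -- the A side: rescan loop → pieces of the active positions
  rw [PySem.List.enumerate_eq_map_pyRange cs 'x', List.foldl_map]
  dsimp only
  rw [pvFoldA cs (fun j => j ∈ P ∧ j ∉ ex.map (fun j => PySem.List.pyGetD P j 0))
      (PySem.List.pyRange 0 (PySem.List.len cs)) [] 0]
  dsimp only
  rw [List.nil_append, hfilt _, hact ex hsub, pvChopAssemble]
  -- the B side: glue loop → pieces of the active positions
  have hg := pvGlue cs char.toList P ex hPpw hPmem P.length 0 (by omega) [] 0 (le_refl 0)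
    (fun p hp => (hPmem p (by simpa using hp)).1)
  simp only [Nat.cast_zero, List.drop_zero, List.nil_append] at hg
  rw [hg]
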